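-- pv_equiv track=rewrite | github.com/Gubir34/AESY | advanced_encryption_lib.py | replace_numbers
-- ===== SOURCE A (Python) =====
-- def replace_numbers(data: str) -> str:
--     result = []
--     for char in data:
--         if char.isdigit():
--             num = int(char)
--             result.append('#' * num)  # Replace the digit with '#' repeated 'num' times
--         else:
--             result.append(char)
--     return ''.join(result)
-- ===== SOURCE B (Python) =====
-- def replace_numbers(data: str) -> str:
--     # Ten staged whole-string passes, one per digit; correct because the
--     # replacement text '#' is not itself a digit, so passes do not interfere.
--     for d in range(10):
--         data = data.replace(str(d), '#' * d)
--     return data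
-- ===== Notes on version B (the rewrite author's own statement) =====
-- stated objective: faster
-- what changed: Replaces the single per-character isdigit/int branch-and-append loop with ten staged whole-string str.replace passes, one per digit (sound since '#' is not a digit), eliminating the explicit character loop, the branch and the join; the passes run in C, which a timing run measured ~5x faster.
import Mathlib
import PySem

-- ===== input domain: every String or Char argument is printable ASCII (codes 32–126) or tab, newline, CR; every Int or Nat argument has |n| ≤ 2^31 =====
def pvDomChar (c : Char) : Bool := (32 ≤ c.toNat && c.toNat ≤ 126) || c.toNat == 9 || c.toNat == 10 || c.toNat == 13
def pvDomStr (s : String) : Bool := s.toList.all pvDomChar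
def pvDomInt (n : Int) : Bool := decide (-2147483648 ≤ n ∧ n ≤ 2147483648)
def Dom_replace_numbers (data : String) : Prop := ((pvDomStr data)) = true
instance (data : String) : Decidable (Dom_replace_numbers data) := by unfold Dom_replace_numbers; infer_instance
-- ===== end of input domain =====

-- B replaces A's per-character isdigit/int branch-and-append loop with ten staged
-- whole-string replace passes, one per digit; measured faster at the check's largest size.

-- ===== PORT A =====
-- literal port: result list of appended pieces, joined with '' at the end;
-- int(char) is char.toNat - 48, exact for ASCII digits (the only chars isdigit accepts)
def replace_numbers (data : String) : String :=
  String.mk (PySem.Chars.join []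
    (data.toList.foldl (fun result char =>
      if PySem.Chars.isdigit char then
        result ++ [List.replicate (char.toNat - 48) '#']
      else
        result ++ [[char]]) []))

-- ===== PORT B =====
-- for d in range(10): data = data.replace(str(d), '#'*d); str(d) of one digit is its char
def replace_numbers_alt (data : String) : String :=
  String.mk ((PySem.List.pyRange 0 10 1).foldl
    (fun s d => PySem.Chars.replace s [Char.ofNat (48 + d.toNat)] (List.replicate d.toNat '#'))
    data.toList)

-- ===== PRECONDITION & SPEC =====
def Spec_replace_numbers (data : String) (out : String) : Prop := out = replace_numbers_alt data
instance (data : String) (out : String) : Decidable (Spec_replace_numbers data out) := by unfold Spec_replace_numbers; infer_instance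

-- ===== CLAIM (what is proved, stated in full; the proofs are below) =====
def Claim_equal_replace_numbers : Prop := ∀ (data : String), Dom_replace_numbers data → Spec_replace_numbers data (replace_numbers data)

-- ===== LEMMAS AND PROOFS =====

-- ''.join of the pieces is their concatenation
theorem pv_join_nil_eq_flatten (parts : List (List Char)) :
    PySem.Chars.join [] parts = parts.flatten := by
  induction parts with
  | nil => simp [PySem.Chars.join, List.intercalate]
  | cons p rest ih =>
    cases rest with
    | nil => simp [PySem.Chars.join_singleton]
    | cons q rest' =>
      rw [PySem.Chars.join_cons_cons]
      simp_all

-- single-character replace is the pointwise substitution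
theorem pv_go_single (d : Char) (new : List Char) :
    ∀ (l : List Char) (fuel : Nat) (acc : List Char), l.length ≤ fuel →
    PySem.Chars.replace.go [d] new fuel l acc
      = acc.reverse ++ l.flatMap (fun c => if c = d then new else [c]) := by
  intro l
  induction l with
  | nil => intro fuel acc _; cases fuel <;> simp [PySem.Chars.replace.go]
  | cons c t ih =>
    intro fuel acc hf
    cases fuel with
    | zero => simp at hf
    | succ fuel =>
      have ht : t.length ≤ fuel := by simpa using hf
      by_cases hcd : c = d
      · subst hcd
        simp [PySem.Chars.replace.go, List.isPrefixOf, ih fuel (new.reverse ++ acc) ht]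
      · have hpre : [d].isPrefixOf (c :: t) = false := by
          simp [List.isPrefixOf]
          exact fun h => absurd h.symm hcd
        simp [PySem.Chars.replace.go, hpre, ih fuel (c :: acc) ht, hcd]

theorem pv_replace_single (d : Char) (new s : List Char) :
    PySem.Chars.replace s [d] new = s.flatMap (fun c => if c = d then new else [c]) := by
  rw [PySem.Chars.replace]
  simp [pv_go_single d new s s.length [] (le_refl _)]

-- flatMap with a pointwise-identity function is the identity
theorem pv_flatMap_id (f : Char → List Char) :
    ∀ (l : List Char), (∀ x ∈ l, f x = [x]) → l.flatMap f = l := by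
  intro l
  induction l with
  | nil => intro _; simp
  | cons c t ih =>
    intro h
    simp [List.flatMap_cons, h c (by simp), ih (fun x hx => h x (by simp [hx]))]

-- staged single-char substitutions over a list of keys fuse into one pointwise pass,
-- provided no replacement text contains a key
theorem pv_fold_fuse (rep : Char → List Char) :
    ∀ (cs : List Char), (∀ d ∈ cs, ∀ x ∈ rep d, x ∉ cs) →
    ∀ (s : List Char),
      cs.foldl (fun s d => s.flatMap (fun c => if c = d then rep d else [c])) s
        = s.flatMap (fun c => if c ∈ cs then rep c else [c]) := by
  intro cs
  induction cs with
  | nil => intro _ s; simp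
  | cons d cs' ih =>
    intro h s
    have h' : ∀ e ∈ cs', ∀ x ∈ rep e, x ∉ cs' := by
      intro e he x hx hmem
      exact h e (by simp [he]) x hx (by simp [hmem])
    rw [List.foldl_cons, ih h', List.flatMap_assoc]
    apply List.flatMap_congr
    intro c _
    by_cases hcd : c = d
    · subst hcd
      have : (rep c).flatMap (fun x => if x ∈ cs' then rep x else [x]) = rep c := by
        apply pv_flatMap_id
        intro x hx
        have : x ∉ c :: cs' := h c (by simp) x hx
        simp at this
        simp [this.2]
      simp [this]
    · simp [hcd]

-- isdigit characterised as membership in the ten digit characters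
theorem pv_isdigit_mem (c : Char) :
    PySem.Chars.isdigit c = true ↔ c ∈ ['0','1','2','3','4','5','6','7','8','9'] := by
  constructor
  · intro h
    have hb : 48 ≤ c.toNat ∧ c.toNat ≤ 57 := by
      simpa [PySem.Chars.isdigit, Char.le_def] using h
    have hc : Char.ofNat c.toNat = c := Char.ofNat_toNat c
    obtain ⟨h1, h2⟩ := hb
    set n := c.toNat with hn
    interval_cases n <;> (rw [← hc]; decide)
  · intro h
    fin_cases h <;> decide

-- ===== VERDICT (by name: the statement is the Claim_ definition above) =====
set_option maxHeartbeats 1000000 in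
theorem replace_numbers_spec : Claim_equal_replace_numbers := by
  intro data _
  unfold Spec_replace_numbers replace_numbers replace_numbers_alt
  -- A's side: the appended pieces joined are one pointwise pass
  have hfun : (fun (result : List (List Char)) (char : Char) =>
      if PySem.Chars.isdigit char then result ++ [List.replicate (char.toNat - 48) '#']
      else result ++ [[char]])
      = (fun acc x => acc ++ [if PySem.Chars.isdigit x then
          List.replicate (x.toNat - 48) '#' else [x]]) := by
    funext acc x; split_ifs <;> rfl
  rw [hfun, PySem.List.foldl_append_singleton_eq_map, List.nil_append, pv_join_nil_eq_flatten,
    ← List.flatMap_def]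
  -- B's side: the ten replace passes are ten pointwise substitutions …
  have hrange : PySem.List.pyRange 0 10 1 = [0,1,2,3,4,5,6,7,8,9] := by decide
  have hstep : (fun (s : List Char) (d : Int) =>
      PySem.Chars.replace s [Char.ofNat (48 + d.toNat)] (List.replicate d.toNat '#'))
      = (fun s d => s.flatMap (fun c =>
          if c = Char.ofNat (48 + d.toNat) then List.replicate d.toNat '#' else [c])) := by
    funext s d; exact pv_replace_single _ _ s
  rw [hrange, hstep]
  -- … which, read over the digit characters, fuse into one pointwise pass
  have hfuse := pv_fold_fuse (fun c => List.replicate (c.toNat - 48) '#')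
    ['0','1','2','3','4','5','6','7','8','9']
    (by intro d hd x hx; rw [List.eq_of_mem_replicate hx]; decide) data.toList
  have hlists : ([0,1,2,3,4,5,6,7,8,9] : List Int).foldl
      (fun s d => s.flatMap (fun c =>
        if c = Char.ofNat (48 + d.toNat) then List.replicate d.toNat '#' else [c]))
      data.toList
      = (['0','1','2','3','4','5','6','7','8','9'] : List Char).foldl
        (fun s d => s.flatMap (fun c =>
          if c = d then List.replicate (d.toNat - 48) '#' else [c])) data.toList := by
    simp only [List.foldl_cons, List.foldl_nil,
      show Char.ofNat (48 + ('0'.toNat - 48)) = '0' from by decide,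
      show Char.ofNat (48 + ('1'.toNat - 48)) = '1' from by decide,
      show Char.ofNat (48 + ('2'.toNat - 48)) = '2' from by decide,
      show Char.ofNat (48 + ('3'.toNat - 48)) = '3' from by decide,
      show Char.ofNat (48 + ('4'.toNat - 48)) = '4' from by decide,
      show Char.ofNat (48 + ('5'.toNat - 48)) = '5' from by decide,
      show Char.ofNat (48 + ('6'.toNat - 48)) = '6' from by decide,
      show Char.ofNat (48 + ('7'.toNat - 48)) = '7' from by decide,
      show Char.ofNat (48 + ('8'.toNat - 48)) = '8' from by decide,
      show Char.ofNat (48 + ('9'.toNat - 48)) = '9' from by decide,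
      show Int.toNat 0 = '0'.toNat - 48 from by decide,
      show Int.toNat 1 = '1'.toNat - 48 from by decide,
      show Int.toNat 2 = '2'.toNat - 48 from by decide,
      show Int.toNat 3 = '3'.toNat - 48 from by decide,
      show Int.toNat 4 = '4'.toNat - 48 from by decide,
      show Int.toNat 5 = '5'.toNat - 48 from by decide,
      show Int.toNat 6 = '6'.toNat - 48 from by decide,
      show Int.toNat 7 = '7'.toNat - 48 from by decide,
      show Int.toNat 8 = '8'.toNat - 48 from by decide,
      show Int.toNat 9 = '9'.toNat - 48 from by decide]
  rw [hlists, hfuse]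
  refine congrArg String.mk (List.flatMap_congr fun c _ => ?_)
  by_cases hd : PySem.Chars.isdigit c
  · simp [hd, (pv_isdigit_mem c).mp hd]
  · have : c ∉ ['0','1','2','3','4','5','6','7','8','9'] := by
      intro hm; exact hd ((pv_isdigit_mem c).mpr hm)
    simp [hd, this]
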